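-- pv_equiv track=rewrite | github.com/Self-Lakshh/QueryMind_AI | ai/inference/inference_server.py | detect_tables_used
-- ===== SOURCE A (Python) =====
-- def detect_tables_used(sql, schema_info):
--     """Identifies which tables from schema are used in the SQL."""
--     available_tables = schema_info.get("tables", [])
--     used = []
--     sql_upper = sql.upper()
--     for table in available_tables:
--         if f" {table.upper()} " in f" {sql_upper} " or f" {table.upper()}." in f" {sql_upper} ":
--             used.append(table)
--     return list(set(used))
-- ===== SOURCE B (Python) =====
-- def detect_tables_used(sql, schema_info):
--     """Identifies which tables from schema are used in the SQL.
--
--     Index-once strategy: one scan of the padded upper-cased SQL collects every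
--     substring that starts right after a space, ends right before a space or a
--     dot, and is no longer than the longest table name; each table then costs a
--     single O(1) set lookup instead of a substring scan of the whole SQL.
--     """
--     tables = schema_info.get("tables", [])
--     longest = 0
--     for t in tables:
--         longest = max(longest, len(t))
--     padded = " " + sql.upper() + " "
--     candidates = set()
--     for i, ch in enumerate(padded):
--         if ch == " ":
--             cur = ""
--             for c in padded[i + 1 : i + longest + 2]:
--                 if c in " .":
--                     candidates.add(cur)
--                 cur += c
--     return list({t for t in tables if t.upper() in candidates})
-- ===== Notes on version B (the rewrite author's own statement) =====
-- stated objective: alternative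
-- what changed: A scans the whole SQL string once per table with two substring tests; B scans the SQL once, building a set of candidate substrings (starting after a space, ending before a space or dot, capped at the longest table-name length), then answers each table with a single set lookup.
import Mathlib
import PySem

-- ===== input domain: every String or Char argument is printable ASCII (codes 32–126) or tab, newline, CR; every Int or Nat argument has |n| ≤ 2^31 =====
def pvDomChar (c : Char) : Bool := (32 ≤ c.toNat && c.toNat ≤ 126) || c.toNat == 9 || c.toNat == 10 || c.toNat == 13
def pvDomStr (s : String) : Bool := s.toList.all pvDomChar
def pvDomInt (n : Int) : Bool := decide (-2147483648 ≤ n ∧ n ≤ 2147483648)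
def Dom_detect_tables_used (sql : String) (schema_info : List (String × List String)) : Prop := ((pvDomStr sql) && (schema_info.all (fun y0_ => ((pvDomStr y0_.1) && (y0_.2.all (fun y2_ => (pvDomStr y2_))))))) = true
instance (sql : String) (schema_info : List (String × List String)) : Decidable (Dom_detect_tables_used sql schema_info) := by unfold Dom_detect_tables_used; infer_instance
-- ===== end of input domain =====

-- B replaces A's per-table substring scans by one index built from the SQL (every substring
-- that starts right after a space, ends right before a space/dot and is no longer than the
-- longest table name) followed by one set lookup per table; return value is unchanged and is
-- compared as a set (Python's list(set(...)) hash order is not modelled; both ports return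
-- first-occurrence order).

-- ===== PORT A =====
def detect_tables_used (sql : String) (schema_info : List (String × List String)) : List String :=
  -- available_tables = schema_info.get("tables", [])
  let available_tables := (PySem.Dict.mk schema_info).getD "tables" []
  -- sql_upper = sql.upper()
  let sql_upper := PySem.Chars.upper sql.toList
  -- for table in available_tables: if " TABLE " in " SQL " or " TABLE." in " SQL ": used.append(table)
  let used := available_tables.foldl
    (fun used table =>
      if PySem.Chars.isIn (' ' :: (PySem.Chars.upper table.toList ++ [' '])) (' ' :: (sql_upper ++ [' '])) ||
         PySem.Chars.isIn (' ' :: (PySem.Chars.upper table.toList ++ ['.'])) (' ' :: (sql_upper ++ [' ']))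
      then used ++ [table] else used) []
  -- return list(set(used)) — ported as first-occurrence dedup (outputs are compared as sets)
  PySem.Set.ofList used

-- ===== PORT B =====
-- c in " ."  ⟺  c == ' ' or c == '.'
def pvDelim (c : Char) : Bool := c = ' ' || c = '.'

def detect_tables_used_alt (sql : String) (schema_info : List (String × List String)) : List String :=
  let tables := (PySem.Dict.mk schema_info).getD "tables" []
  -- longest = 0; for t in tables: longest = max(longest, len(t))
  let longest : Int := tables.foldl (fun acc t => max acc (PySem.Str.len t)) 0
  -- padded = " " + sql.upper() + " "
  let padded : List Char := ' ' :: (PySem.Chars.upper sql.toList ++ [' '])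
  -- for i, ch in enumerate(padded): if ch == " ": cur = ""
  --   for c in padded[i+1 : i+longest+2]: if c in " .": candidates.add(cur); cur += c
  let cands : PySem.Set (List Char) :=
    (PySem.List.enumerate padded).foldl
      (fun s p => if p.2 = ' '
        then ((PySem.List.slice padded (some (p.1 + 1)) (some (p.1 + longest + 2))).foldl
                (fun st c => (if pvDelim c then PySem.Set.add st.1 st.2 else st.1, st.2 ++ [c]))
                (s, ([] : List Char))).1
        else s)
      PySem.Set.empty
  -- return list({t for t in tables if t.upper() in candidates}) — first-occurrence order (set order not modelled)
  PySem.Set.ofList (tables.filter (fun t => PySem.Set.contains cands (PySem.Chars.upper t.toList)))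

-- ===== PRECONDITION & SPEC =====
def Spec_detect_tables_used (sql : String) (schema_info : List (String × List String)) (out : List String) : Prop := out = detect_tables_used_alt sql schema_info
instance (sql : String) (schema_info : List (String × List String)) (out : List String) : Decidable (Spec_detect_tables_used sql schema_info out) := by unfold Spec_detect_tables_used; infer_instance

-- ===== CLAIM (what is proved, stated in full; the proofs are below) =====
def Claim_equal_detect_tables_used : Prop := ∀ (sql : String) (schema_info : List (String × List String)), Dom_detect_tables_used sql schema_info → Spec_detect_tables_used sql schema_info (detect_tables_used sql schema_info)

-- ===== LEMMAS AND PROOFS =====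

-- membership in the result of B's inner loop over one window
theorem pv_mem_inner (w : List Char) :
    ∀ (s : PySem.Set (List Char)) (cur x : List Char),
    (x ∈ (w.foldl (fun st c => (if pvDelim c then PySem.Set.add st.1 st.2 else st.1, st.2 ++ [c]))
        (s, cur)).1)
    ↔ x ∈ s ∨ ∃ y d r, w = y ++ d :: r ∧ pvDelim d = true ∧ x = cur ++ y := by
  induction w with
  | nil => simp
  | cons c w ih =>
    intro s cur x
    rw [List.foldl_cons, ih]
    constructor
    · rintro (hs | ⟨y, d, r, hw, hd, hx⟩)
      · by_cases hc : pvDelim c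
        · simp [hc, PySem.Set.mem_add] at hs
          rcases hs with hs | rfl
          · exact Or.inl hs
          · exact Or.inr ⟨[], c, w, by simp, hc, by simp⟩
        · simp [hc] at hs
          exact Or.inl hs
      · exact Or.inr ⟨c :: y, d, r, by simp [hw], hd, by simp [hx]⟩
    · rintro (hs | ⟨y, d, r, hw, hd, hx⟩)
      · left
        by_cases hc : pvDelim c <;> simp [hc, PySem.Set.mem_add, hs]
      · cases y with
        | nil =>
          simp at hw
          obtain ⟨rfl, rfl⟩ := hw
          left
          simp [hd, PySem.Set.mem_add, hx]
        | cons a y =>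
          simp at hw
          obtain ⟨rfl, hw⟩ := hw
          exact Or.inr ⟨y, d, r, hw, hd, by simp [hx]⟩

-- membership in B's candidate set, as a statement about positions in `full`
theorem pv_mem_outer (full : List Char) (longest : Int) :
    ∀ (l : List Char) (k : Int) (s : PySem.Set (List Char)) (x : List Char),
    (x ∈ (PySem.List.enumerate l k).foldl
        (fun s p => if p.2 = ' '
          then ((PySem.List.slice full (some (p.1 + 1)) (some (p.1 + longest + 2))).foldl
                  (fun st c => (if pvDelim c then PySem.Set.add st.1 st.2 else st.1, st.2 ++ [c]))
                  (s, ([] : List Char))).1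
          else s) s)
    ↔ x ∈ s ∨ ∃ j : Nat, ∃ _ : j < l.length, l[j] = ' ' ∧
        ∃ d r, PySem.List.slice full (some (k + j + 1)) (some (k + j + longest + 2)) = x ++ d :: r ∧ pvDelim d = true := by
  intro l
  induction l with
  | nil => simp [PySem.List.enumerate]
  | cons c l ih =>
    intro k s x
    rw [PySem.List.enumerate_cons, List.foldl_cons, ih]
    have hmem : (x ∈ (if c = ' '
          then ((PySem.List.slice full (some (k + 1)) (some (k + longest + 2))).foldl
                  (fun st c => (if pvDelim c then PySem.Set.add st.1 st.2 else st.1, st.2 ++ [c]))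
                  (s, ([] : List Char))).1
          else s)) ↔ x ∈ s ∨ (c = ' ' ∧
        ∃ d r, PySem.List.slice full (some (k + 1)) (some (k + longest + 2)) = x ++ d :: r ∧ pvDelim d = true) := by
      by_cases hc : c = ' '
      · rw [if_pos hc, pv_mem_inner]
        simp only [hc, true_and, List.nil_append]
        constructor
        · rintro (hs | ⟨y, d, r, hw, hd, rfl⟩)
          · exact Or.inl hs
          · exact Or.inr ⟨d, r, hw, hd⟩
        · rintro (hs | ⟨d, r, hw, hd⟩)
          · exact Or.inl hs
          · exact Or.inr ⟨x, d, r, hw, hd, rfl⟩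
      · simp [hc]
    rw [hmem]
    constructor
    · rintro (hs | ⟨j, hj, hsp, d, r, hw, hd⟩)
      · rcases hs with hs | ⟨hc, d, r, hw, hd⟩
        · exact Or.inl hs
        · refine Or.inr ⟨0, by simp, by simpa using hc, d, r, ?_, hd⟩
          simpa using hw
      · refine Or.inr ⟨j + 1, by simpa using hj, by simpa using hsp, d, r, ?_, hd⟩
        have : k + 1 + (j : Int) = k + ((j : Nat) + 1 : Nat) := by push_cast; ring
        rw [← this]; exact hw
    · rintro (hs | ⟨j, hj, hsp, d, r, hw, hd⟩)
      · exact Or.inl (Or.inl hs)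
      · cases j with
        | zero =>
          refine Or.inl (Or.inr ⟨by simpa using hsp, d, r, ?_, hd⟩)
          simpa using hw
        | succ j =>
          refine Or.inr ⟨j, by simpa using hj, by simpa using hsp, d, r, ?_, hd⟩
          have : k + 1 + (j : Int) = k + ((j + 1 : Nat) : Int) := by push_cast; ring
          rw [this]; exact hw

-- a decomposition of `take m xs` is a decomposition of `xs` short enough to survive the take
theorem pv_take_decomp {α : Type} (xs y : List α) (d : α) (m : Nat) :
    (∃ r, xs.take m = y ++ d :: r) ↔ (∃ r, xs = y ++ d :: r) ∧ y.length + 1 ≤ m := by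
  constructor
  · rintro ⟨r, hr⟩
    have hxs : xs = y ++ d :: (r ++ xs.drop m) := by
      conv_lhs => rw [← List.take_append_drop m xs]
      rw [hr]; simp
    have hlen : y.length + 1 ≤ m := by
      have := congrArg List.length hr
      simp [List.length_take] at this
      omega
    exact ⟨⟨_, hxs⟩, hlen⟩
  · rintro ⟨⟨r, rfl⟩, hlen⟩
    refine ⟨(d :: r).take (m - y.length) |>.tail, ?_⟩
    rw [List.take_append, List.take_of_length_le (by omega)]
    congr 1
    have : m - y.length = (m - y.length - 1) + 1 := by omega
    rw [this, List.take_succ_cons]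
    simp

-- the window at position j is a take of a drop of `full`
theorem pv_window_eq (full : List Char) (longest : Int) (hL : 0 ≤ longest) (j : Nat) :
    PySem.List.slice full (some ((j : Int) + 1)) (some ((j : Int) + longest + 2))
      = (full.drop (j + 1)).take (longest.toNat + 1) := by
  rw [PySem.List.slice_toNat full (by omega) (by omega)]
  have h1 : ((j : Int) + 1).toNat = j + 1 := by omega
  rw [h1]
  have h2 : ((j : Int) + longest + 2).toNat - (j + 1) = longest.toNat + 1 := by omega
  rw [h2]

-- position-with-window form  ⟺  A's two infix tests, for x short enough
theorem pv_occ_iff (full x : List Char) (longest : Int) (hL : 0 ≤ longest)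
    (hx : x.length ≤ longest.toNat) :
    (∃ j : Nat, ∃ _ : j < full.length, full[j] = ' ' ∧
        ∃ d r, PySem.List.slice full (some ((j : Int) + 1)) (some ((j : Int) + longest + 2)) = x ++ d :: r ∧ pvDelim d = true)
    ↔ ((' ' :: (x ++ [' '])) <:+: full ∨ (' ' :: (x ++ ['.'])) <:+: full) := by
  have key : (∃ j : Nat, ∃ _ : j < full.length, full[j] = ' ' ∧
        ∃ d r, full.drop (j + 1) = x ++ d :: r ∧ pvDelim d = true)
      ↔ ((' ' :: (x ++ [' '])) <:+: full ∨ (' ' :: (x ++ ['.'])) <:+: full) := by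
    constructor
    · rintro ⟨j, hj, hsp, d, r, hdr, hd⟩
      have hfull : full = full.take j ++ ' ' :: (x ++ d :: r) := by
        conv_lhs => rw [← List.take_append_drop j full, List.drop_eq_getElem_cons hj, hsp, hdr]
      have hinf : (' ' :: (x ++ [d])) <:+: full := by
        rw [hfull]
        exact ⟨full.take j, r, by simp⟩
      have : d = ' ' ∨ d = '.' := by
        simp [pvDelim] at hd; tauto
      rcases this with rfl | rfl
      · exact Or.inl hinf
      · exact Or.inr hinf
    · have h : ∀ d : Char, pvDelim d = true → (' ' :: (x ++ [d])) <:+: full →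
          (∃ j : Nat, ∃ _ : j < full.length, full[j] = ' ' ∧
            ∃ d r, full.drop (j + 1) = x ++ d :: r ∧ pvDelim d = true) := by
        rintro d hd ⟨u, v, huv⟩
        subst huv
        have hfull : u ++ ' ' :: (x ++ [d]) ++ v = u ++ (' ' :: (x ++ d :: v)) := by simp
        rw [hfull]
        have hj : u.length < (u ++ (' ' :: (x ++ d :: v))).length := by simp
        refine ⟨u.length, hj, ?_, d, v, ?_, hd⟩
        · rw [List.getElem_append_right (le_refl u.length)]
          simp
        · have h1 : u ++ (' ' :: (x ++ d :: v)) = (u ++ [' ']) ++ (x ++ d :: v) := by simp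
          have h2 : u.length + 1 = (u ++ [' ']).length := by simp
          rw [h1, h2, List.drop_left]
      rintro (hinf | hinf)
      · exact h ' ' (by simp [pvDelim]) hinf
      · exact h '.' (by simp [pvDelim]) hinf
  rw [← key]
  constructor <;> rintro ⟨j, hj, hsp, d, r, hdr, hd⟩
  · rw [pv_window_eq full longest hL j] at hdr
    obtain ⟨⟨r', hr'⟩, -⟩ := (pv_take_decomp (full.drop (j+1)) x d (longest.toNat + 1)).mp ⟨r, hdr⟩
    exact ⟨j, hj, hsp, d, r', hr', hd⟩
  · refine ⟨j, hj, hsp, d, ?_⟩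
    rw [pv_window_eq full longest hL j]
    obtain ⟨r', hr'⟩ := (pv_take_decomp (full.drop (j+1)) x d (longest.toNat + 1)).mpr ⟨⟨r, hdr⟩, by omega⟩
    exact ⟨r', hr', hd⟩

-- the two ports agree on every input
theorem pv_main (sql : String) (schema_info : List (String × List String)) :
    detect_tables_used sql schema_info = detect_tables_used_alt sql schema_info := by
  unfold detect_tables_used detect_tables_used_alt
  dsimp only
  rw [PySem.List.foldl_append_if]
  simp only [List.nil_append, List.map_id']
  congr 1
  apply List.filter_congr
  intro t ht
  have hmax := PySem.List.le_foldl_max_int ((PySem.Dict.mk schema_info).getD "tables" []) (fun t => PySem.Str.len t) 0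
  set tables := (PySem.Dict.mk schema_info).getD "tables" [] with htab
  set longest : Int := tables.foldl (fun acc t => max acc (PySem.Str.len t)) 0 with hlong
  have hL : 0 ≤ longest := hmax.1
  have hlen : (PySem.Chars.upper t.toList).length ≤ longest.toNat := by
    have h1 := hmax.2 t ht
    have h2 : PySem.Str.len t = (t.toList.length : Int) := by
      simp [PySem.Str.len_eq]
    have h3 : (PySem.Chars.upper t.toList).length = t.toList.length := by
      simp [PySem.Chars.upper]
    omega
  set U := PySem.Chars.upper sql.toList with hU
  set P : List Char := ' ' :: (U ++ [' ']) with hP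
  set TU := PySem.Chars.upper t.toList with hTU
  rw [Bool.eq_iff_iff]
  rw [Bool.or_eq_true, PySem.Chars.isIn_iff_infix, PySem.Chars.isIn_iff_infix,
      PySem.Set.contains_iff, pv_mem_outer P longest P 0 PySem.Set.empty TU]
  have hempty : (TU ∈ PySem.Set.empty) ↔ False := by
    simp [PySem.Set.empty]
  rw [hempty]
  simp only [zero_add, false_or]
  rw [pv_occ_iff P TU longest hL hlen]

-- ===== VERDICT (by name: the statement is the Claim_ definition above) =====
theorem detect_tables_used_spec : Claim_equal_detect_tables_used := by
  intro sql schema_info _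
  unfold Spec_detect_tables_used
  exact pv_main sql schema_info
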